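-- pv_equiv track=rewrite | github.com/kirilklein/opmatch | opmatch/util/match_utils.py | get_case_control_dic
-- ===== SOURCE A (Python) =====
-- from typing import Dict, List, Union
--
-- def get_case_control_dic(mincostFlow_dic:Dict):
--     """From mincostFlow_dic creates a dictionary with case patients as keys
--     and corresponding matched control patients as values."""
--     case_control_dic = dict()
--     for control in list(mincostFlow_dic.keys()):
--         for case in list(mincostFlow_dic[control].keys()):
--             if case not in case_control_dic.keys():
--                 case_control_dic[case] = []
--             if mincostFlow_dic[control][case]==1:
--                 case_control_dic[case] = case_control_dic[case]+[control]
--     return case_control_dic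
-- ===== SOURCE B (Python) =====
-- def get_case_control_dic(mincostFlow_dic):
--     """From mincostFlow_dic creates a dictionary with case patients as keys
--     and corresponding matched control patients as values."""
--     cases = dict.fromkeys(case for d in mincostFlow_dic.values() for case in d)
--     return {case: [control for control, d in mincostFlow_dic.items()
--                    if d.get(case) == 1]
--             for case in cases}
-- ===== Notes on version B (the rewrite author's own statement) =====
-- stated objective: alternative
-- what changed: B transposes the traversal: instead of A's control-major nested loop that mutates a growing dict (membership test + list concatenation per pair), B first computes the ordered deduplicated case list with dict.fromkeys, then builds the result case-major, computing each case's value in one shot as a list comprehension scanning all controls.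
import Mathlib
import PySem

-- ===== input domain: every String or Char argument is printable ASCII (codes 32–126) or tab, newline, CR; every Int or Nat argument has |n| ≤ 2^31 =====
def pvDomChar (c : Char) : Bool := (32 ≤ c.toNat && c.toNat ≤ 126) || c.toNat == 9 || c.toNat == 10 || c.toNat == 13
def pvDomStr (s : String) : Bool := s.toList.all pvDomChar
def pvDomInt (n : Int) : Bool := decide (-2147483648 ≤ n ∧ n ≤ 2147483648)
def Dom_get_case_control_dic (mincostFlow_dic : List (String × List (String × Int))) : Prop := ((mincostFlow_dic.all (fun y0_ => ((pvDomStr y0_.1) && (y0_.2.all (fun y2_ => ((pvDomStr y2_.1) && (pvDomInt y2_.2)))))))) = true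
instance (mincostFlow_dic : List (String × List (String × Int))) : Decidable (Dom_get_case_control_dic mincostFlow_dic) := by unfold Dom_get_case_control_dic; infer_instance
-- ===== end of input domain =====

-- B transposes the traversal: the ordered set of cases is computed first (dict.fromkeys), then the
-- result is built case-major, each value as one comprehension over all controls; objective: alternative.

-- shared input conversion: the nested Python dict argument as PySem dicts
def pvToDicts (m : List (String × List (String × Int))) : PySem.Dict String (PySem.Dict String Int) :=
  PySem.Dict.ofList (m.map (fun p => (p.1, PySem.Dict.ofList p.2)))

-- ===== PORT A =====
-- A's inner loop over the cases of one control
def pvAInner (control : String) (d : PySem.Dict String Int)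
    (ks : List String) (ccd : PySem.Dict String (List String)) : PySem.Dict String (List String) :=
  ks.foldl (fun ccd case_ =>
    let ccd' := if ccd.contains case_ then ccd else ccd.insert case_ []
    if d.getD case_ 0 == 1 then ccd'.insert case_ (ccd'.getD case_ [] ++ [control]) else ccd') ccd

def get_case_control_dic (mincostFlow_dic : List (String × List (String × Int))) : List (String × List String) :=
  let md := pvToDicts mincostFlow_dic
  (md.keys.foldl (fun ccd control =>
      let d := (md.get? control).getD PySem.Dict.empty
      pvAInner control d d.keys ccd) PySem.Dict.empty).items

-- ===== PORT B =====
def get_case_control_dic_alt (mincostFlow_dic : List (String × List (String × Int))) : List (String × List String) :=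
  let md := pvToDicts mincostFlow_dic
  -- cases = dict.fromkeys(case for d in values for case in d): ordered dedup of all inner keys
  let cases := PySem.List.dedup (md.values.flatMap (fun d => d.keys))
  -- {case: [control for control, d in items if d.get(case) == 1] for case in cases}
  (cases.foldl (fun r case_ =>
      r.insert case_ ((md.items.filter (fun p => p.2.get? case_ == some 1)).map (fun p => p.1)))
    PySem.Dict.empty).items

-- ===== PRECONDITION & SPEC =====
def Spec_get_case_control_dic (mincostFlow_dic : List (String × List (String × Int))) (out : List (String × List String)) : Prop := out = get_case_control_dic_alt mincostFlow_dic
instance (mincostFlow_dic : List (String × List (String × Int))) (out : List (String × List String)) : Decidable (Spec_get_case_control_dic mincostFlow_dic out) := by unfold Spec_get_case_control_dic; infer_instance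

-- ===== CLAIM (what is proved, stated in full; the proofs are below) =====
def Claim_equal_get_case_control_dic : Prop := ∀ (mincostFlow_dic : List (String × List (String × Int))), Dom_get_case_control_dic mincostFlow_dic → Spec_get_case_control_dic mincostFlow_dic (get_case_control_dic mincostFlow_dic)

-- ===== LEMMAS AND PROOFS =====

-- the ordered key accumulation A performs, as a Set.update
def pvKeysAfter (ks : List String) (K : List String) : List String := PySem.Set.update K ks

theorem pvKeysAfter_cons (k : String) (ks K : List String) :
    pvKeysAfter (k :: ks) K = pvKeysAfter ks (if k ∈ K then K else K ++ [k]) := by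
  unfold pvKeysAfter
  rw [PySem.Set.update_cons]
  congr 1
  show (if PySem.Set.contains K k then K else K ++ [k]) = _
  simp [PySem.Set.contains]

-- the matched-control list both programs accumulate for a given case x
def pvF (x : String) (L : List (String × PySem.Dict String Int)) : List String :=
  L.flatMap (fun p => if p.2.get? x = some 1 then [p.1] else [])

theorem pvF_cons (x : String) (p : String × PySem.Dict String Int)
    (L : List (String × PySem.Dict String Int)) :
    pvF x (p :: L) = (if p.2.get? x = some 1 then [p.1] else []) ++ pvF x L := by
  simp [pvF]

-- A's outer loop, as a fold over (control, inner dict) pairs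
def pvRA (L : List (String × PySem.Dict String Int)) (ccd : PySem.Dict String (List String)) : PySem.Dict String (List String) :=
  L.foldl (fun ccd p => pvAInner p.1 p.2 p.2.keys ccd) ccd

-- the key accumulation over a whole pair list
def pvKFold (L : List (String × PySem.Dict String Int)) (K : List String) : List String :=
  L.foldl (fun K p => pvKeysAfter p.2.keys K) K

theorem pvKFold_cons (p : String × PySem.Dict String Int) (L : List (String × PySem.Dict String Int))
    (K : List String) : pvKFold (p :: L) K = pvKFold L (pvKeysAfter p.2.keys K) := rfl

-- one iteration of A's inner loop
def pvAStep (control : String) (d : PySem.Dict String Int)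
    (ccd : PySem.Dict String (List String)) (case_ : String) : PySem.Dict String (List String) :=
  let ccd' := if ccd.contains case_ then ccd else ccd.insert case_ []
  if d.getD case_ 0 == 1 then ccd'.insert case_ (ccd'.getD case_ [] ++ [control]) else ccd'

theorem pvAInner_cons (control : String) (d : PySem.Dict String Int) (k : String) (ks : List String)
    (ccd : PySem.Dict String (List String)) :
    pvAInner control d (k :: ks) ccd = pvAInner control d ks (pvAStep control d ccd k) := rfl

theorem pvRA_cons (p : String × PySem.Dict String Int) (L : List (String × PySem.Dict String Int))
    (ccd : PySem.Dict String (List String)) :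
    pvRA (p :: L) ccd = pvRA L (pvAInner p.1 p.2 p.2.keys ccd) := rfl

theorem pvAStep_keys (control : String) (d : PySem.Dict String Int)
    (ccd : PySem.Dict String (List String)) (k : String) :
    (pvAStep control d ccd k).keys = if k ∈ ccd.keys then ccd.keys else ccd.keys ++ [k] := by
  unfold pvAStep
  cases hc : ccd.contains k with
  | true =>
    rw [if_pos ((PySem.Dict.contains_iff_mem_keys ccd k).mp hc)]
    simp only [if_true]
    split
    · exact PySem.Dict.keys_insert_of_contains _ _ hc
    · rfl
  | false =>
    have hk : k ∉ ccd.keys := fun h => by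
      simp [(PySem.Dict.contains_iff_mem_keys ccd k).mpr h] at hc
    rw [if_neg hk]
    simp only [Bool.false_eq_true, if_false]
    split
    · rw [PySem.Dict.keys_insert_of_contains _ _ (PySem.Dict.contains_insert_self ccd k []),
        PySem.Dict.keys_insert_of_not_contains _ _ hc]
    · exact PySem.Dict.keys_insert_of_not_contains _ _ hc

theorem pvA_inner_keys (control : String) (d : PySem.Dict String Int) (ks : List String)
    (ccd : PySem.Dict String (List String)) :
    (pvAInner control d ks ccd).keys = pvKeysAfter ks ccd.keys := by
  induction ks generalizing ccd with
  | nil => rfl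
  | cons k ks ih =>
    rw [pvAInner_cons, ih, pvKeysAfter_cons, pvAStep_keys]

theorem pvAStep_getD (control : String) (d : PySem.Dict String Int)
    (ccd : PySem.Dict String (List String)) (k x : String) :
    (pvAStep control d ccd k).getD x [] =
      ccd.getD x [] ++ (if x = k ∧ d.getD k 0 = 1 then [control] else []) := by
  unfold pvAStep
  have hens : ∀ y : String, (if ccd.contains k then ccd else ccd.insert k []).getD y ([] : List String)
      = ccd.getD y [] := by
    intro y
    cases hc : ccd.contains k with
    | true => simp
    | false =>
      simp only [Bool.false_eq_true, if_false]
      rw [PySem.Dict.getD_insert]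
      split
      · next h => subst h; rw [PySem.Dict.getD_of_not_contains _ _ hc]
      · rfl
  cases hd : (d.getD k 0 == 1) with
  | true =>
    simp only [if_true]
    rw [PySem.Dict.getD_insert]
    by_cases hx : x = k
    · subst hx
      rw [if_pos rfl, hens x, if_pos ⟨rfl, by simpa using hd⟩]
    · rw [if_neg hx, hens x, if_neg (fun h => hx h.1), List.append_nil]
  | false =>
    simp only [Bool.false_eq_true, if_false]
    rw [hens x, if_neg (fun h => by simp [h.2] at hd), List.append_nil]

theorem pvA_inner_getD (control : String) (d : PySem.Dict String Int) (ks : List String)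
    (hnd : ks.Nodup) (ccd : PySem.Dict String (List String)) (x : String) :
    (pvAInner control d ks ccd).getD x [] =
      ccd.getD x [] ++ (if x ∈ ks ∧ d.getD x 0 = 1 then [control] else []) := by
  induction ks generalizing ccd with
  | nil => simp [pvAInner]
  | cons k ks ih =>
    rw [pvAInner_cons, ih (List.Nodup.of_cons hnd), pvAStep_getD]
    by_cases hx : x = k
    · subst hx
      have hxks : x ∉ ks := (List.nodup_cons.mp hnd).1
      by_cases hd : d.getD x 0 = 1 <;> simp [hd, hxks]
    · by_cases hm : x ∈ ks <;> by_cases hd : d.getD x 0 = 1 <;> simp [hx, hm, hd]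

theorem pvCond_iff (d : PySem.Dict String Int) (x : String) :
    (x ∈ d.keys ∧ d.getD x 0 = 1) ↔ d.get? x = some 1 := by
  rw [PySem.Dict.getD_eq_get?_getD]
  cases hg : d.get? x with
  | none =>
    simp only [Option.getD_none]
    constructor
    · rintro ⟨hm, h1⟩; cases h1
    · intro h; cases h
  | some v =>
    have hm : x ∈ d.keys := by
      by_contra hn
      rw [(PySem.Dict.get?_eq_none_iff_not_mem_keys d x).mpr hn] at hg
      cases hg
    simp [hm]

theorem pvRA_keys (L : List (String × PySem.Dict String Int)) (ccd : PySem.Dict String (List String)) :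
    (pvRA L ccd).keys = pvKFold L ccd.keys := by
  induction L generalizing ccd with
  | nil => rfl
  | cons p L ih =>
    rw [pvRA_cons, ih, pvKFold_cons, pvA_inner_keys]

theorem pvRA_getD (L : List (String × PySem.Dict String Int))
    (h : ∀ p ∈ L, p.2.keys.Nodup) (ccd : PySem.Dict String (List String)) (x : String) :
    (pvRA L ccd).getD x [] = ccd.getD x [] ++ pvF x L := by
  induction L generalizing ccd with
  | nil => simp [pvRA, pvF]
  | cons p L ih =>
    rw [pvRA_cons, ih (fun q hq => h q (List.mem_cons_of_mem _ hq)),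
      pvA_inner_getD p.1 p.2 p.2.keys (h p List.mem_cons_self), pvF_cons, List.append_assoc]
    congr 2
    by_cases hc : p.2.get? x = some 1
    · rw [if_pos hc, if_pos ((pvCond_iff p.2 x).mpr hc)]
    · rw [if_neg hc, if_neg (fun hh => hc ((pvCond_iff p.2 x).mp hh))]

-- B's dedup over the flattened inner keys equals A's accumulated key list
theorem pvUpdate_flatMap (L : List (String × PySem.Dict String Int)) (K : List String) :
    PySem.Set.update K (L.flatMap (fun p => p.2.keys)) = pvKFold L K := by
  induction L generalizing K with
  | nil => rfl
  | cons p L ih =>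
    rw [List.flatMap_cons, PySem.Set.update_append, ih, pvKFold_cons, pvKeysAfter]

theorem pvCases_eq (L : List (String × PySem.Dict String Int)) :
    PySem.List.dedup (L.flatMap (fun p => p.2.keys)) = pvKFold L [] := by
  rw [PySem.List.dedup_eq_ofList, ← PySem.Set.update_nil_left, pvUpdate_flatMap]

-- B's comprehension value equals pvF
theorem pvFilterMap_eq_pvF (x : String) (L : List (String × PySem.Dict String Int)) :
    (L.filter (fun p => p.2.get? x == some 1)).map (fun p => p.1) = pvF x L := by
  induction L with
  | nil => rfl
  | cons p L ih =>
    rw [List.filter_cons, pvF_cons, ← ih]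
    by_cases hc : p.2.get? x = some 1
    · simp [hc]
    · simp [hc]

theorem pvNodup_keysAfter (ks K : List String) (h : K.Nodup) : (pvKeysAfter ks K).Nodup :=
  PySem.Set.nodup_update _ _ h

theorem pvNodup_KFold (L : List (String × PySem.Dict String Int)) (K : List String)
    (h : K.Nodup) : (pvKFold L K).Nodup := by
  induction L generalizing K with
  | nil => exact h
  | cons p L ih => exact ih _ (pvNodup_keysAfter _ _ h)

theorem pvMem_items_update {κ ν : Type} [BEq κ] [LawfulBEq κ] (xs : List (κ × ν))
    (d : PySem.Dict κ ν) (p : κ × ν) (h : p ∈ (d.update xs).items) : p ∈ d.items ∨ p ∈ xs := by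
  induction xs generalizing d with
  | nil => exact Or.inl h
  | cons q xs ih =>
    rw [PySem.Dict.update, List.foldl_cons, ← PySem.Dict.update] at h
    rcases ih _ h with h | h
    · rcases (PySem.Dict.mem_items_insert d q.1 q.2 p).mp h with h | h
      · right; simp [h]
      · exact Or.inl h.1
    · right; exact List.mem_cons_of_mem _ h

theorem pvMem_items_ofList {κ ν : Type} [BEq κ] [LawfulBEq κ] (xs : List (κ × ν)) (p : κ × ν)
    (h : p ∈ (PySem.Dict.ofList xs).items) : p ∈ xs := by
  rcases pvMem_items_update xs PySem.Dict.empty p h with h | h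
  · cases h
  · exact h

theorem pvInner_nodup (m : List (String × List (String × Int))) :
    ∀ p ∈ (pvToDicts m).items, p.2.keys.Nodup := by
  intro p hp
  have := pvMem_items_ofList _ p hp
  rcases List.mem_map.mp this with ⟨y, _, rfl⟩
  exact PySem.Dict.nodup_keys_ofList _

-- ===== VERDICT (by name: the statement is the Claim_ definition above) =====
theorem get_case_control_dic_spec : Claim_equal_get_case_control_dic := by
  intro m _
  unfold Spec_get_case_control_dic get_case_control_dic get_case_control_dic_alt
  simp only
  set md := pvToDicts m with hmd_def
  have hmdnd : md.keys.Nodup := PySem.Dict.nodup_keys_ofList _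
  have hitems : md.items = md.keys.map (fun k => (k, md.getD k PySem.Dict.empty)) :=
    PySem.Dict.items_eq_map_keys md hmdnd PySem.Dict.empty
  have hvnd : ∀ p ∈ md.items, p.2.keys.Nodup := pvInner_nodup m
  -- A's fold over keys is pvRA over items
  have hA : (md.keys.foldl (fun ccd control =>
      let d := (md.get? control).getD PySem.Dict.empty
      pvAInner control d d.keys ccd) PySem.Dict.empty) = pvRA md.items PySem.Dict.empty := by
    rw [pvRA, hitems, List.foldl_map]
    simp only [← PySem.Dict.getD_eq_get?_getD]
  rw [hA]
  set DA := pvRA md.items PySem.Dict.empty with hDA_def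
  -- B's case list is A's accumulated key list
  have hvals : md.values = md.items.map (fun p => p.2) := rfl
  have hcases : PySem.List.dedup (md.values.flatMap (fun d => d.keys)) = pvKFold md.items [] := by
    rw [hvals, List.flatMap_map, pvCases_eq]
  have hnodup : (pvKFold md.items []).Nodup := pvNodup_KFold _ _ List.nodup_nil
  -- B's fold of inserts over fresh distinct keys appends
  have hB : ((PySem.List.dedup (md.values.flatMap (fun d => d.keys))).foldl (fun r case_ =>
        r.insert case_ ((md.items.filter (fun p => p.2.get? case_ == some 1)).map (fun p => p.1)))
      PySem.Dict.empty).items =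
      (pvKFold md.items []).map (fun c =>
        (c, (md.items.filter (fun p => p.2.get? c == some 1)).map (fun p => p.1))) := by
    rw [hcases]
    have := PySem.Dict.items_foldl_insert_fresh (l := pvKFold md.items []) (k := fun a => a)
      (v := fun c => (md.items.filter (fun p => p.2.get? c == some 1)).map (fun p => p.1))
      (d := PySem.Dict.empty)
      (fun a _ => PySem.Dict.contains_empty a) (by simpa using hnodup)
    simpa using this
  rw [hB]
  -- A's items, pointwise equal to B's
  have hDAkeys : DA.keys = pvKFold md.items [] := by
    rw [hDA_def, pvRA_keys, PySem.Dict.keys_empty]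
  rw [PySem.Dict.items_eq_map_keys DA (hDAkeys ▸ hnodup) [], hDAkeys]
  refine List.map_congr_left (fun k _ => ?_)
  rw [hDA_def, pvRA_getD _ hvnd, PySem.Dict.getD_empty, pvFilterMap_eq_pvF]
  simp
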